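-- pv_equiv track=rewrite | github.com/Alan-learner/python_learning | leetcode/week316_t4-greedy_odd_even_sort.py | makeSimilar
-- ===== SOURCE A (Python) =====
-- from typing import List
-- from bisect import bisect_left, bisect_right
--
-- def makeSimilar(nums: List[int], target: List[int]) -> int:
--     nums1 = []
--     nums2 = []
--     for n in target:
--         if n % 2 == 0:
--             nums2.append(n)
--         else:
--             nums1.append(n)
--     nums1.sort()
--     nums2.sort()
--     n1 = len(nums1)
--     n2 = len(nums2)
--     cost = 0
--     n = len(nums)
--     for num in nums:
--         if num % 2 == 0:
--
--             b = bisect_right(nums2, num)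
--             a = b - 1
--             if a > n2 - 1:
--                 a = n2 - 1
--             if b > n2 - 1:
--                 b = n2 - 1
--             x = abs(nums2[a] - num)
--             y = abs(nums2[b] - num)
--             cost += min(x, y)
--         else:
--
--             b = bisect_right(nums1, num)
--             a = b - 1
--             if a > n1 - 1:
--                 a = n1 - 1
--             if b > n1 - 1:
--                 b = n1 - 1
--             x = abs(nums1[a] - num)
--             y = abs(nums1[b] - num)
--             cost += min(x, y)
--     return cost // 4
-- ===== SOURCE B (Python) =====
-- def makeSimilar(nums, target):
--     # No sorting, no bisect: split target by parity once, then for each num do a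
--     # plain linear scan over the matching-parity group for the nearest value.
--     odds = [t for t in target if t % 2]
--     evens = [t for t in target if t % 2 == 0]
--     cost = 0
--     for num in nums:
--         group = odds if num % 2 else evens
--         best = abs(group[0] - num)
--         for t in group[1:]:
--             d = abs(t - num)
--             if d < best:
--                 best = d
--         cost += best
--     return cost // 4
-- ===== Notes on version B (the rewrite author's own statement) =====
-- stated objective: simpler
-- what changed: Replaced the sort-then-bisect neighbor lookup (with index clamping and negative-index wraparound) by a one-pass parity split of target and a plain linear minimum-distance scan per num.
import Mathlib
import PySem

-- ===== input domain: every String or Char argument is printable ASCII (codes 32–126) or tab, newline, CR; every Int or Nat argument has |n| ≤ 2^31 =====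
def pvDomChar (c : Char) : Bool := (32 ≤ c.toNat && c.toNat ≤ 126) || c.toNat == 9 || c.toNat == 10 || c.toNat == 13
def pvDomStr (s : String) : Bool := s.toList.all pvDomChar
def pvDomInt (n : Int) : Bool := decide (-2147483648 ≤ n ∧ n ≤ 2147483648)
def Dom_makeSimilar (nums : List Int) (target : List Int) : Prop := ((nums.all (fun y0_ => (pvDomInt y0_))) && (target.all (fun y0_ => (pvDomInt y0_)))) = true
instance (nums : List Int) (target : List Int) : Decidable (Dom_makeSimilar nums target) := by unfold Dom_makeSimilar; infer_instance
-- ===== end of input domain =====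

-- B replaces A's sort + bisect neighbor lookup (with clamping and negative-index wraparound)
-- by a parity split of target and a plain linear nearest-distance scan: simpler, no sorting.

-- ===== PORT A =====
-- A's per-number bisect/clamp/index block (both parity branches run this same code on their group).
-- pyGetD's default is never reached under Pre_ (the group is nonempty, and Python's negative index -1 wraps).
def pvNeighborCost (s : List Int) (num : Int) : Int :=
  let n : Int := s.length
  let b0 : Int := PySem.List.bisectRight s num
  let a0 : Int := b0 - 1
  let a : Int := if a0 > n - 1 then n - 1 else a0
  let b : Int := if b0 > n - 1 then n - 1 else b0
  let x : Int := |PySem.List.pyGetD s a 0 - num|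
  let y : Int := |PySem.List.pyGetD s b 0 - num|
  min x y

def makeSimilar (nums : List Int) (target : List Int) : Int :=
  let p := target.foldl
    (fun (acc : List Int × List Int) n =>
      if PySem.Int.mod n 2 == 0 then (acc.1, acc.2 ++ [n]) else (acc.1 ++ [n], acc.2))
    ([], [])
  let nums1 := PySem.List.sorted p.1 (fun x => x) false
  let nums2 := PySem.List.sorted p.2 (fun x => x) false
  let cost := nums.foldl
    (fun cost num =>
      if PySem.Int.mod num 2 == 0 then cost + pvNeighborCost nums2 num
      else cost + pvNeighborCost nums1 num)
    0
  PySem.Int.floordiv cost 4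

-- ===== PORT B =====
-- Source B's inner scan: best = abs(group[0] - num), then min over group[1:].
-- The [] case returns 0; it is unreachable under Pre_ (Python raises IndexError there).
def pvStep (num best t : Int) : Int :=
  let d := |t - num|
  if d < best then d else best

def pvNearest : List Int → Int → Int
  | [], _ => 0
  | t0 :: rest, num => rest.foldl (pvStep num) (|t0 - num|)

def makeSimilar_alt (nums : List Int) (target : List Int) : Int :=
  let odds := target.filter (fun t => !(PySem.Int.mod t 2 == 0))
  let evens := target.filter (fun t => PySem.Int.mod t 2 == 0)
  let cost := nums.foldl
    (fun cost num =>
      cost + pvNearest (if !(PySem.Int.mod num 2 == 0) then odds else evens) num)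
    0
  PySem.Int.floordiv cost 4

-- ===== PRECONDITION & SPEC =====
-- Pre_ excludes inputs where some num has no same-parity element in target: there both
-- A and B raise IndexError (A indexes an empty group, B reads group[0]).
def Pre_makeSimilar (nums : List Int) (target : List Int) : Prop :=
  ∀ num ∈ nums, ∃ t ∈ target, PySem.Int.mod t 2 = PySem.Int.mod num 2
instance (nums : List Int) (target : List Int) : Decidable (Pre_makeSimilar nums target) := by
  unfold Pre_makeSimilar; infer_instance
def pvWitness_makeSimilar : List Int × List Int := ([2, -3, 10], [1, 4, 7])

def Spec_makeSimilar (nums : List Int) (target : List Int) (out : Int) : Prop := out = makeSimilar_alt nums target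
instance (nums : List Int) (target : List Int) (out : Int) : Decidable (Spec_makeSimilar nums target out) := by unfold Spec_makeSimilar; infer_instance

-- ===== CLAIM (what is proved, stated in full; the proofs are below) =====
def Claim_equal_makeSimilar : Prop := ∀ (nums : List Int) (target : List Int), Dom_makeSimilar nums target → Pre_makeSimilar nums target → Spec_makeSimilar nums target (makeSimilar nums target)

-- ===== LEMMAS AND PROOFS =====

-- m is the minimum of |t - num| over g
def IsMinAbs (g : List Int) (num m : Int) : Prop :=
  (∃ t ∈ g, |t - num| = m) ∧ ∀ t ∈ g, m ≤ |t - num|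

theorem isMinAbs_unique {g : List Int} {num m m' : Int}
    (h : IsMinAbs g num m) (h' : IsMinAbs g num m') : m = m' := by
  obtain ⟨⟨t, ht, htv⟩, hle⟩ := h
  obtain ⟨⟨t', ht', htv'⟩, hle'⟩ := h'
  have := hle t' ht'
  have := hle' t ht
  omega

theorem foldl_min_spec (r : List Int) (num : Int) (init : Int) :
    (r.foldl (pvStep num) init = init ∨
      ∃ t ∈ r, r.foldl (pvStep num) init = |t - num|) ∧
    r.foldl (pvStep num) init ≤ init ∧
    ∀ t ∈ r, r.foldl (pvStep num) init ≤ |t - num| := by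
  induction r generalizing init with
  | nil => simp
  | cons h0 tl ih =>
    rw [List.foldl_cons]
    have hstep : pvStep num init h0 = if |h0 - num| < init then |h0 - num| else init := rfl
    by_cases hc : |h0 - num| < init
    · rw [hstep, if_pos hc]
      obtain ⟨he, hle, hall⟩ := ih (|h0 - num|)
      refine ⟨?_, by omega, ?_⟩
      · rcases he with he | ⟨t, ht, htv⟩
        · exact Or.inr ⟨h0, by simp, he⟩
        · exact Or.inr ⟨t, by simp [ht], htv⟩
      · intro t ht
        rcases List.mem_cons.mp ht with rfl | ht
        · omega
        · exact hall t ht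
    · rw [hstep, if_neg hc]
      obtain ⟨he, hle, hall⟩ := ih init
      refine ⟨?_, hle, ?_⟩
      · rcases he with he | ⟨t, ht, htv⟩
        · exact Or.inl he
        · exact Or.inr ⟨t, by simp [ht], htv⟩
      · intro t ht
        rcases List.mem_cons.mp ht with rfl | ht
        · omega
        · exact hall t ht

theorem pvNearest_isMinAbs (g : List Int) (num : Int) (hg : g ≠ []) :
    IsMinAbs g num (pvNearest g num) := by
  match g, hg with
  | t0 :: rest, _ =>
    obtain ⟨he, hle, hall⟩ := foldl_min_spec rest num (|t0 - num|)
    rw [show pvNearest (t0 :: rest) num = rest.foldl (pvStep num) (|t0 - num|) from rfl]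
    constructor
    · rcases he with he | ⟨t, ht, htv⟩
      · exact ⟨t0, by simp, he.symm⟩
      · exact ⟨t, by simp [ht], htv.symm⟩
    · intro t ht
      rcases List.mem_cons.mp ht with rfl | ht
      · exact hle
      · exact hall t ht

theorem pvNeighborCost_isMinAbs (s : List Int) (num : Int)
    (hpair : s.Pairwise (· ≤ ·)) (hs : s ≠ []) :
    IsMinAbs s num (pvNeighborCost s num) := by
  obtain ⟨hk_le, hlt_le, hge_gt⟩ := PySem.List.bisectRight_spec s num hpair
  have hn : 0 < s.length := List.length_pos_iff.mpr hs
  have hmono : ∀ i j (hi : i < s.length) (hj : j < s.length), i ≤ j → s[i] ≤ s[j] := by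
    intro i j hi hj hij
    rcases Nat.lt_or_ge i j with h | h
    · exact List.pairwise_iff_getElem.mp hpair i j hi hj h
    · have : i = j := by omega
      subst this; exact le_refl _
  unfold pvNeighborCost
  simp only
  set k := PySem.List.bisectRight s num with hk
  have hna : ¬((k : Int) - 1 > (s.length : Int) - 1) := by
    have := hk_le; omega
  rw [if_neg hna]
  rcases Nat.eq_zero_or_pos k with hk0 | hkpos
  · -- k = 0: a = -1 wraps to the last element, b = 0
    have hb : ¬((k : Int) > (s.length : Int) - 1) := by omega
    rw [if_neg hb, hk0]
    simp only [Nat.cast_zero, zero_sub]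
    rw [PySem.List.pyGetD_neg_one s 0 hs]
    rw [PySem.List.pyGetD_eq_getElem s (i := 0) 0 (by omega) (by exact_mod_cast hn)]
    have hall_gt : ∀ j (hj : j < s.length), num < s[j] := by
      intro j hj; exact hge_gt j hj (by omega)
    have h0 : num < s[0] := hall_gt 0 hn
    have hlast : s.getLast hs = s[s.length - 1] := List.getLast_eq_getElem hs
    constructor
    · rcases min_cases (|s.getLast hs - num|) (|s[(0:Int).toNat] - num|) with ⟨hm, _⟩ | ⟨hm, _⟩
      · exact ⟨s.getLast hs, List.getLast_mem hs, hm.symm⟩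
      · exact ⟨s[(0:Int).toNat], List.getElem_mem _, hm.symm⟩
    · intro t ht
      obtain ⟨j, hj, rfl⟩ := List.mem_iff_getElem.mp ht
      simp only [Int.toNat_zero]
      have h1 : s[0] ≤ s[j] := hmono 0 j hn hj (by omega)
      have h2 : num < s[j] := hall_gt j hj
      have ha : |s[0] - num| = s[0] - num := abs_of_pos (by have := hall_gt 0 hn; omega)
      have hb' : |s[j] - num| = s[j] - num := abs_of_pos (by omega)
      have hmr := min_le_right (|s.getLast hs - num|) (|s[0] - num|)
      omega
  · rcases Nat.lt_or_ge k s.length with hklt | hkn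
    · -- 0 < k < length: a = k-1, b = k
      have hb : ¬((k : Int) > (s.length : Int) - 1) := by omega
      rw [if_neg hb]
      rw [PySem.List.pyGetD_eq_getElem s (i := (k : Int) - 1) 0 (by omega) (by omega)]
      rw [PySem.List.pyGetD_eq_getElem s (i := (k : Int)) 0 (by omega) (by exact_mod_cast hklt)]
      have hik : ((k : Int) - 1).toNat = k - 1 := by omega
      have hik2 : ((k : Int)).toNat = k := by omega
      have hx : s[((k : Int) - 1).toNat] ≤ num := by
        have := hlt_le (k - 1) (by omega) (by omega)
        simp only [hik]; exact this
      have hy : num < s[((k : Int)).toNat] := by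
        have := hge_gt k hklt (le_refl _)
        simp only [hik2]; exact this
      constructor
      · rcases min_cases (|s[((k : Int) - 1).toNat] - num|) (|s[((k : Int)).toNat] - num|) with ⟨hm, _⟩ | ⟨hm, _⟩
        · exact ⟨_, List.getElem_mem _, hm.symm⟩
        · exact ⟨_, List.getElem_mem _, hm.symm⟩
      · intro t ht
        obtain ⟨j, hj, rfl⟩ := List.mem_iff_getElem.mp ht
        rcases Nat.lt_or_ge j k with hjk | hjk
        · -- s[j] ≤ s[k-1] ≤ num
          have h1 : s[j] ≤ s[((k : Int) - 1).toNat] :=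
            hmono j (((k : Int) - 1).toNat) hj (by omega) (by omega)
          have h2 : s[j] ≤ num := hlt_le j hj hjk
          have ha : |s[((k : Int) - 1).toNat] - num| = num - s[((k : Int) - 1).toNat] := by
            rw [abs_of_nonpos (by omega)]; omega
          have hb' : |s[j] - num| = num - s[j] := by
            rw [abs_of_nonpos (by omega)]; omega
          have hminx := min_le_left (|s[((k : Int) - 1).toNat] - num|) (|s[((k : Int)).toNat] - num|)
          omega
        · -- num < s[k] ≤ s[j]
          have h1 : s[((k : Int)).toNat] ≤ s[j] := hmono (((k : Int)).toNat) j (by omega) hj (by omega)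
          have h2 : num < s[j] := hge_gt j hj hjk
          have ha : |s[((k : Int)).toNat] - num| = s[((k : Int)).toNat] - num := abs_of_pos (by omega)
          have hb' : |s[j] - num| = s[j] - num := abs_of_pos (by omega)
          have hminy := min_le_right (|s[((k : Int) - 1).toNat] - num|) (|s[((k : Int)).toNat] - num|)
          omega
    · -- k = length: both indices clamp to length - 1
      have hkeq : k = s.length := by omega
      have hb : ((k : Int) > (s.length : Int) - 1) := by omega
      rw [if_pos hb]
      rw [PySem.List.pyGetD_eq_getElem s (i := (k : Int) - 1) 0 (by omega) (by omega)]
      rw [PySem.List.pyGetD_eq_getElem s (i := (s.length : Int) - 1) 0 (by omega) (by omega)]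
      have hik : ((k : Int) - 1).toNat = s.length - 1 := by omega
      have hik2 : (((s.length : Int)) - 1).toNat = s.length - 1 := by omega
      have hall_le : ∀ j (hj : j < s.length), s[j] ≤ num := by
        intro j hj; exact hlt_le j hj (by omega)
      have hlastle : s[((k : Int) - 1).toNat] ≤ num := hall_le _ (by omega)
      constructor
      · rcases min_cases (|s[((k : Int) - 1).toNat] - num|) (|s[(((s.length : Int)) - 1).toNat] - num|) with ⟨hm, _⟩ | ⟨hm, _⟩
        · exact ⟨_, List.getElem_mem _, hm.symm⟩
        · exact ⟨_, List.getElem_mem _, hm.symm⟩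
      · intro t ht
        obtain ⟨j, hj, rfl⟩ := List.mem_iff_getElem.mp ht
        have h1 : s[j] ≤ s[((k : Int) - 1).toNat] :=
          hmono j _ hj (by omega) (by omega)
        have h2 : s[j] ≤ num := hall_le j hj
        have ha : |s[((k : Int) - 1).toNat] - num| = num - s[((k : Int) - 1).toNat] := by
          rw [abs_of_nonpos (by omega)]; omega
        have hb' : |s[j] - num| = num - s[j] := by
          rw [abs_of_nonpos (by omega)]; omega
        have hminx := min_le_left (|s[((k : Int) - 1).toNat] - num|) (|s[(((s.length : Int)) - 1).toNat] - num|)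
        omega

-- per-number agreement: A's bisect/clamp lookup on the sorted group = B's linear scan on the raw group
theorem neighborCost_sorted_eq_nearest (g : List Int) (num : Int) (hg : g ≠ []) :
    pvNeighborCost (PySem.List.sorted g (fun x => x) false) num = pvNearest g num := by
  have hs : PySem.List.sorted g (fun x => x) false ≠ [] := by
    rw [Ne, PySem.List.sorted_eq_nil_iff]; exact hg
  have hpair : (PySem.List.sorted g (fun x => x) false).Pairwise (· ≤ ·) :=
    PySem.List.sorted_pairwise g (fun x => x)
  have hA := pvNeighborCost_isMinAbs _ num hpair hs
  have hB := pvNearest_isMinAbs g num hg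
  have hA' : IsMinAbs g num (pvNeighborCost (PySem.List.sorted g (fun x => x) false) num) := by
    obtain ⟨⟨t, ht, htv⟩, hle⟩ := hA
    exact ⟨⟨t, (PySem.List.mem_sorted g _ false t).mp ht, htv⟩,
      fun t ht => hle t ((PySem.List.mem_sorted g _ false t).mpr ht)⟩
  exact isMinAbs_unique hA' hB

-- A's target-partition loop builds exactly the two parity filters
theorem partition_foldl_eq (target : List Int) (l1 l2 : List Int) :
    target.foldl
      (fun (acc : List Int × List Int) n =>
        if PySem.Int.mod n 2 == 0 then (acc.1, acc.2 ++ [n]) else (acc.1 ++ [n], acc.2))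
      (l1, l2)
    = (l1 ++ target.filter (fun t => !(PySem.Int.mod t 2 == 0)),
       l2 ++ target.filter (fun t => PySem.Int.mod t 2 == 0)) := by
  induction target generalizing l1 l2 with
  | nil => simp
  | cons h tl ih =>
    rw [List.foldl_cons]
    by_cases hc : (PySem.Int.mod h 2 == 0) = true
    · rw [if_pos hc, ih, List.filter_cons, List.filter_cons, hc]
      simp only [Bool.not_true, Bool.false_eq_true, reduceIte, List.append_assoc,
        List.singleton_append]
    · have hc' : (PySem.Int.mod h 2 == 0) = false := by
        revert hc; cases (PySem.Int.mod h 2 == 0) <;> simp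
      rw [if_neg hc, ih, List.filter_cons, List.filter_cons, hc']
      simp only [Bool.not_false, Bool.false_eq_true, reduceIte, List.append_assoc,
        List.singleton_append]

-- mod t 2 = mod num 2 names the same-parity group as the Bool tests in the ports
theorem parity_match (t num : Int) :
    (PySem.Int.mod t 2 = PySem.Int.mod num 2) ↔
      ((PySem.Int.mod num 2 == 0) = true → (PySem.Int.mod t 2 == 0) = true) ∧
      ((PySem.Int.mod num 2 == 0) = false → (PySem.Int.mod t 2 == 0) = false) := by
  have h1 := PySem.Int.mod_nonneg t (b := 2) (by omega)
  have h2 := PySem.Int.mod_lt t (b := 2) (by omega)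
  have h3 := PySem.Int.mod_nonneg num (b := 2) (by omega)
  have h4 := PySem.Int.mod_lt num (b := 2) (by omega)
  constructor
  · intro h
    refine ⟨fun hh => ?_, fun hh => ?_⟩
    · rw [beq_iff_eq] at hh ⊢; omega
    · rw [beq_eq_false_iff_ne] at hh ⊢; omega
  · rintro ⟨ha, hb⟩
    by_cases hnum : PySem.Int.mod num 2 = 0
    · have := ha (beq_iff_eq.mpr hnum); rw [beq_iff_eq] at this; omega
    · have := hb (beq_eq_false_iff_ne.mpr hnum); rw [beq_eq_false_iff_ne] at this; omega

theorem makeSimilar_eq (nums target : List Int) (hpre : Pre_makeSimilar nums target) :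
    makeSimilar nums target = makeSimilar_alt nums target := by
  unfold makeSimilar makeSimilar_alt
  simp only
  rw [partition_foldl_eq target [] []]
  simp only [List.nil_append]
  congr 1
  apply PySem.List.foldl_congr_mem
  intro acc num hnum
  obtain ⟨t, ht, htp⟩ := hpre num hnum
  rw [parity_match] at htp
  by_cases hc : (PySem.Int.mod num 2 == 0) = true
  · have hne : target.filter (fun t => PySem.Int.mod t 2 == 0) ≠ [] := by
      intro hempty
      have hmem : t ∈ target.filter (fun t => PySem.Int.mod t 2 == 0) :=
        List.mem_filter.mpr ⟨ht, htp.1 hc⟩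
      rw [hempty] at hmem
      exact absurd hmem (List.not_mem_nil)
    rw [if_pos hc, if_neg (by rw [hc]; decide),
      neighborCost_sorted_eq_nearest _ num hne]
  · have hc' : (PySem.Int.mod num 2 == 0) = false := by
      revert hc; cases (PySem.Int.mod num 2 == 0) <;> simp
    have hne : target.filter (fun t => !(PySem.Int.mod t 2 == 0)) ≠ [] := by
      intro hempty
      have hmem : t ∈ target.filter (fun t => !(PySem.Int.mod t 2 == 0)) := by
        refine List.mem_filter.mpr ⟨ht, ?_⟩
        rw [htp.2 hc']; rfl
      rw [hempty] at hmem
      exact absurd hmem (List.not_mem_nil)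
    rw [if_neg hc, if_pos (by rw [hc']; decide),
      neighborCost_sorted_eq_nearest _ num hne]

-- ===== VERDICT (by name: the statement is the Claim_ definition above) =====
theorem makeSimilar_spec : Claim_equal_makeSimilar := by
  intro nums target _ hpre
  unfold Spec_makeSimilar
  exact makeSimilar_eq nums target hpre
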